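-- pv_equiv track=rewrite | github.com/JeonghwanH/explainable_cdss | main.py | make_rectangle_from_boolean
-- ===== SOURCE A (Python) =====
-- def make_rectangle_from_boolean(activation):
--     rectangle_start_list = []
--     rectangle_end_list = []
--     rectangle_tuple_list = []
--     for i in range(len(activation)-1):
--         if int(activation[i])==0 and int(activation[i+1])!=0:
--             rectangle_start_list.append(i)
--
--     for i in range(1, len(activation)):
--         if int(activation[i-1])==0 and int(activation[i])!=0:
--             rectangle_end_list.append(i)
--
--     iterator = 0
--     temp_len = len(rectangle_start_list)
--     while(iterator<temp_len-1):
--         while(rectangle_start_list[iterator+1]-rectangle_end_list[iterator]<100):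
--             rectangle_start_list.pop(iterator+1)
--             rectangle_end_list.pop(iterator)
--             temp_len = temp_len-1
--             if iterator==temp_len-1:
--                 break
--         iterator = iterator + 1
--
--     assert len(rectangle_start_list)==len(rectangle_end_list)
--     for i in range(len(rectangle_start_list)):
--         rectangle_tuple_list.append((rectangle_start_list[i], rectangle_end_list[i]))
--
--     return rectangle_tuple_list
-- ===== SOURCE B (Python) =====
-- def make_rectangle_from_boolean(activation):
--     """Single-pass version: detect rising edges and merge small gaps online
--     with one result-list accumulator (fuses A's two scans + pop loop + zip)."""
--     result = []
--     for i in range(len(activation) - 1):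
--         if int(activation[i]) == 0 and int(activation[i + 1]) != 0:
--             if result and i - result[-1][1] < 100:
--                 result[-1] = (result[-1][0], i + 1)
--             else:
--                 result.append((i, i + 1))
--     return result
-- ===== Notes on version B (the rewrite author's own statement) =====
-- stated objective: faster
-- what changed: Replaces A's four passes (two edge-detection scans, a pop-based in-place merge of two index lists, and a final zip loop) by a single online pass that detects each rising edge and immediately merges it into the last rectangle when the gap is < 100, keeping only the result list.
import Mathlib
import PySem

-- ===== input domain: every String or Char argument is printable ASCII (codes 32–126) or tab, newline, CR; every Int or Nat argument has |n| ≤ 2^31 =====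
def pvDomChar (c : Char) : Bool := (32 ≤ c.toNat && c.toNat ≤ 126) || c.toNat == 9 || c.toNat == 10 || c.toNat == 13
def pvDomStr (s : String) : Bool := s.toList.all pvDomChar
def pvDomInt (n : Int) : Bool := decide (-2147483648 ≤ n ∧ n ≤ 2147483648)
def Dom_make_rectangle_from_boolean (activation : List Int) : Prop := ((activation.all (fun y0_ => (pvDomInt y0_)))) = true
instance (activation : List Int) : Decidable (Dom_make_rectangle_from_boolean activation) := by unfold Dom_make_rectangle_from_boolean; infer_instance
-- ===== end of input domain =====

-- B fuses A's two edge-detection scans, pop-based gap merge and final zip into one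
-- online pass with a single result-list accumulator (measured faster by the check).

-- ===== PORT A =====
-- Python's inner `while`: pops at iterator+1 / iterator while the gap is < 100;
-- the Nat parameter is the current temp_len, which strictly decreases on each pop.
def pvInner (starts ends : List Int) (iterator : Nat) : Nat → List Int × List Int × Nat
  | 0 => (starts, ends, 0)   -- unreachable totality guard (inner loop is entered only with temp_len ≥ 2)
  | t + 1 =>
    if PySem.List.pyGetD starts ((iterator : Int) + 1) 0 - PySem.List.pyGetD ends (iterator : Int) 0 < 100 then
      let starts' := starts.eraseIdx (iterator + 1)
      let ends' := ends.eraseIdx iterator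
      if iterator == t - 1 then (starts', ends', t)
      else pvInner starts' ends' iterator t
    else (starts, ends, t + 1)

theorem pvInner_le (starts ends : List Int) (iterator : Nat) : ∀ t, (pvInner starts ends iterator t).2.2 ≤ t := by
  intro t
  induction t generalizing starts ends with
  | zero => simp [pvInner]
  | succ t ih =>
    simp only [pvInner]
    split
    · split
      · simp
      · exact le_trans (ih _ _) (Nat.le_succ t)
    · exact le_refl _

-- Python's outer `while(iterator<temp_len-1)` loop.
def pvOuter (starts ends : List Int) (iterator tempLen : Nat) : List Int × List Int :=
  if iterator < tempLen - 1 then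
    let r := pvInner starts ends iterator tempLen
    pvOuter r.1 r.2.1 (iterator + 1) r.2.2
  else (starts, ends)
termination_by tempLen - iterator
decreasing_by
  have h := pvInner_le starts ends iterator tempLen
  omega

def make_rectangle_from_boolean (activation : List Int) : List (Int × Int) :=
  let starts := (PySem.List.pyRange 0 ((activation.length : Int) - 1) 1).foldl
    (fun acc i => if PySem.List.pyGetD activation i 0 = 0 ∧ PySem.List.pyGetD activation (i + 1) 0 ≠ 0
                  then acc ++ [i] else acc) []
  let ends := (PySem.List.pyRange 1 (activation.length : Int) 1).foldl
    (fun acc i => if PySem.List.pyGetD activation (i - 1) 0 = 0 ∧ PySem.List.pyGetD activation i 0 ≠ 0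
                  then acc ++ [i] else acc) []
  let r := pvOuter starts ends 0 starts.length
  (PySem.List.pyRange 0 ((r.1.length : Int)) 1).foldl
    (fun acc i => acc ++ [(PySem.List.pyGetD r.1 i 0, PySem.List.pyGetD r.2 i 0)]) []

-- ===== PORT B =====
def make_rectangle_from_boolean_alt (activation : List Int) : List (Int × Int) :=
  (PySem.List.pyRange 0 ((activation.length : Int) - 1) 1).foldl
    (fun res i =>
      if PySem.List.pyGetD activation i 0 = 0 ∧ PySem.List.pyGetD activation (i + 1) 0 ≠ 0 then
        match res.getLast? with
        | some (s, e) =>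
          if i - e < 100 then res.dropLast ++ [(s, i + 1)]
          else res ++ [(i, i + 1)]
        | none => res ++ [(i, i + 1)]
      else res) []

-- ===== PRECONDITION & SPEC =====
def Spec_make_rectangle_from_boolean (activation : List Int) (out : List (Int × Int)) : Prop := out = make_rectangle_from_boolean_alt activation
instance (activation : List Int) (out : List (Int × Int)) : Decidable (Spec_make_rectangle_from_boolean activation out) := by unfold Spec_make_rectangle_from_boolean; infer_instance

-- ===== CLAIM (what is proved, stated in full; the proofs are below) =====
def Claim_equal_make_rectangle_from_boolean : Prop := ∀ (activation : List Int), Dom_make_rectangle_from_boolean activation → Spec_make_rectangle_from_boolean activation (make_rectangle_from_boolean activation)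

-- ===== LEMMAS AND PROOFS =====

-- canonical "inner while" on the suffixes of the two index lists
def pvIc : List Int → List Int → List Int × List Int
  | s0 :: s1 :: ss, e0 :: e1 :: es =>
    if s1 - e0 < 100 then pvIc (s0 :: ss) (e1 :: es) else (s0 :: s1 :: ss, e0 :: e1 :: es)
  | s, e => (s, e)
termination_by s _ => s.length

-- canonical full merge on the two index lists
def pvCm : List Int → List Int → List Int × List Int
  | s0 :: s1 :: ss, e0 :: e1 :: es =>
    if s1 - e0 < 100 then pvCm (s0 :: ss) (e1 :: es)
    else (s0 :: (pvCm (s1 :: ss) (e1 :: es)).1, e0 :: (pvCm (s1 :: ss) (e1 :: es)).2)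
  | s, e => (s, e)
termination_by s _ => s.length

-- canonical merge on the list of rectangle pairs
def pvPm : List (Int × Int) → List (Int × Int)
  | (a, b) :: (c, d) :: r => if c - b < 100 then pvPm ((a, d) :: r) else (a, b) :: pvPm ((c, d) :: r)
  | l => l
termination_by l => l.length

-- one step of B's loop body (after the edge test)
def pvStep (res : List (Int × Int)) (i : Int) : List (Int × Int) :=
  match res.getLast? with
  | some (s, e) => if i - e < 100 then res.dropLast ++ [(s, i + 1)] else res ++ [(i, i + 1)]
  | none => res ++ [(i, i + 1)]

-- the rising-edge indices
def pvEdges (a : List Int) : List Int :=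
  (PySem.List.pyRange 0 ((a.length : Int) - 1) 1).filter
    (fun i => decide (PySem.List.pyGetD a i 0 = 0 ∧ PySem.List.pyGetD a (i + 1) 0 ≠ 0))

theorem pv_eraseIdx_append {α : Type} (p l : List α) (k : Nat) :
    (p ++ l).eraseIdx (p.length + k) = p ++ l.eraseIdx k := by
  induction p with
  | nil => simp
  | cons x xs ih => simp [List.eraseIdx_cons_succ, Nat.succ_add, ih]

theorem pvIc_len {s e : List Int} (h : s.length = e.length) :
    (pvIc s e).1.length = (pvIc s e).2.length := by
  fun_induction pvIc s e with
  | case1 s0 s1 ss e0 e1 es hlt ih => simp at h; exact ih (by simpa using h)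
  | case2 s0 s1 ss e0 e1 es hlt => simpa using h
  | case3 s e hs => exact h

theorem pvIc_len_le (s e : List Int) : (pvIc s e).1.length ≤ s.length := by
  fun_induction pvIc s e with
  | case1 s0 s1 ss e0 e1 es hlt ih => simp at ih ⊢; omega
  | case2 s0 s1 ss e0 e1 es hlt => simp
  | case3 s e hs => simp

theorem pvIc_head? : ∀ (s e : List Int), (pvIc s e).1.head? = s.head? := by
  intro s e
  fun_induction pvIc s e with
  | case1 s0 s1 ss e0 e1 es hlt ih => simpa using ih
  | case2 s0 s1 ss e0 e1 es hlt => rfl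
  | case3 s e hs => rfl

theorem pvCm_len : ∀ (s e : List Int), s.length = e.length →
    (pvCm s e).1.length = (pvCm s e).2.length := by
  intro s e
  fun_induction pvCm s e with
  | case1 s0 s1 ss e0 e1 es hlt ih =>
    intro h; exact ih (by simp at h ⊢; omega)
  | case2 s0 s1 ss e0 e1 es hlt ih =>
    intro h
    have := ih (by simp at h ⊢; omega)
    simp [this]
  | case3 s e hs => intro h; exact h

theorem pvCm_eq_ic : ∀ (s e : List Int), 2 ≤ s.length → s.length = e.length →
    pvCm s e = ((pvIc s e).1.headD 0 :: (pvCm (pvIc s e).1.tail (pvIc s e).2.tail).1,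
                (pvIc s e).2.headD 0 :: (pvCm (pvIc s e).1.tail (pvIc s e).2.tail).2) := by
  intro s e
  fun_induction pvIc s e with
  | case1 s0 s1 ss e0 e1 es hlt ih =>
    intro h2 hlen
    cases ss with
    | nil =>
      obtain rfl : es = [] := by
        cases es with
        | nil => rfl
        | cons y t => simp at hlen
      simp [pvCm, pvIc, hlt]
    | cons x xs =>
      have := ih (by simp) (by simp at hlen ⊢; omega)
      simp only [pvCm, if_pos hlt]
      exact this
  | case2 s0 s1 ss e0 e1 es hlt =>
    intro h2 hlen
    simp only [pvCm, if_neg hlt]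
    rfl
  | case3 s e hs =>
    intro h2 hlen
    exfalso
    rcases s with _ | ⟨sa, _ | ⟨sb, st⟩⟩
    · simp at h2
    · simp at h2
    · rcases e with _ | ⟨ea, _ | ⟨eb, et⟩⟩
      · simp at hlen
      · simp at hlen
      · exact hs sa sb st ea eb et rfl rfl

theorem pv_getD_append {α : Type} (p l : List α) (k : Nat) (d : α) :
    (p ++ l).getD (p.length + k) d = l.getD k d := by
  induction p with
  | nil => simp
  | cons x xs ih =>
    have h : (x :: xs).length + k = (xs.length + k) + 1 := by
      simp only [List.length_cons]; omega
    rw [h, List.cons_append, List.getD_cons_succ, ih]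

theorem pvInner_eq_ic : ∀ (ss es : List Int), ss.length = es.length →
    ∀ (s0 s1 e0 e1 : Int) (p q : List Int), p.length = q.length →
    pvInner (p ++ s0 :: s1 :: ss) (q ++ e0 :: e1 :: es) p.length (p.length + (2 + ss.length)) =
      (p ++ (pvIc (s0 :: s1 :: ss) (e0 :: e1 :: es)).1,
       q ++ (pvIc (s0 :: s1 :: ss) (e0 :: e1 :: es)).2,
       p.length + (pvIc (s0 :: s1 :: ss) (e0 :: e1 :: es)).1.length) := by
  intro ss
  induction ss with
  | nil =>
    intro es hlen s0 s1 e0 e1 p q hpq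
    obtain rfl : es = [] := List.length_eq_zero_iff.mp hlen.symm
    have ht : p.length + (2 + ([] : List Int).length) = (p.length + 1) + 1 := by simp
    rw [ht, pvInner]
    have hs1 : PySem.List.pyGetD (p ++ s0 :: s1 :: []) ((p.length : Int) + 1) 0 = s1 := by
      have h1 : ((p.length : Int) + 1) = (((p.length + 1 : Nat)) : Int) := by push_cast; ring
      rw [h1, PySem.List.pyGetD_natCast]
      have h2 := pv_getD_append p (s0 :: s1 :: []) 1 (0 : Int)
      simp only [List.getD_cons_succ, List.getD_cons_zero] at h2
      exact h2
    have he0 : PySem.List.pyGetD (q ++ e0 :: e1 :: []) ((p.length : Int)) 0 = e0 := by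
      rw [PySem.List.pyGetD_natCast, hpq]
      have h2 := pv_getD_append q (e0 :: e1 :: []) 0 (0 : Int)
      simp only [Nat.add_zero, List.getD_cons_zero] at h2
      exact h2
    rw [hs1, he0]
    split
    · rename_i hlt
      have hes : (p ++ s0 :: s1 :: []).eraseIdx (p.length + 1) = p ++ [s0] := by
        rw [pv_eraseIdx_append]; rfl
      have hee : (q ++ e0 :: e1 :: []).eraseIdx p.length = q ++ [e1] := by
        rw [hpq, show q.length = q.length + 0 from rfl, pv_eraseIdx_append]; rfl
      simp only [hes, hee]
      rw [if_pos (by simp)]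
      simp [pvIc, hlt]
    · rename_i hlt
      simp [pvIc, hlt]
  | cons x xs ih =>
    intro es hlen s0 s1 e0 e1 p q hpq
    obtain ⟨y, es', rfl⟩ : ∃ y es', es = y :: es' := by
      cases es with
      | nil => simp at hlen
      | cons y es' => exact ⟨y, es', rfl⟩
    have ht : p.length + (2 + (x :: xs).length) = (p.length + 2 + xs.length) + 1 := by
      simp; omega
    rw [ht, pvInner]
    have hs1 : PySem.List.pyGetD (p ++ s0 :: s1 :: x :: xs) ((p.length : Int) + 1) 0 = s1 := by
      have h1 : ((p.length : Int) + 1) = (((p.length + 1 : Nat)) : Int) := by push_cast; ring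
      rw [h1, PySem.List.pyGetD_natCast]
      have h2 := pv_getD_append p (s0 :: s1 :: x :: xs) 1 (0 : Int)
      simp only [List.getD_cons_succ, List.getD_cons_zero] at h2
      exact h2
    have he0 : PySem.List.pyGetD (q ++ e0 :: e1 :: y :: es') ((p.length : Int)) 0 = e0 := by
      rw [PySem.List.pyGetD_natCast, hpq]
      have h2 := pv_getD_append q (e0 :: e1 :: y :: es') 0 (0 : Int)
      simp only [Nat.add_zero, List.getD_cons_zero] at h2
      exact h2
    rw [hs1, he0]
    split
    · rename_i hlt
      have hes : (p ++ s0 :: s1 :: x :: xs).eraseIdx (p.length + 1) = p ++ s0 :: x :: xs := by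
        rw [pv_eraseIdx_append]; rfl
      have hee : (q ++ e0 :: e1 :: y :: es').eraseIdx p.length = q ++ e1 :: y :: es' := by
        rw [hpq, show q.length = q.length + 0 from rfl, pv_eraseIdx_append]; rfl
      simp only [hes, hee]
      rw [if_neg (by simp only [beq_iff_eq]; omega)]
      have harg : p.length + 2 + xs.length = p.length + (2 + xs.length) := by omega
      rw [harg, ih es' (by simpa using hlen) s0 x e1 y p q hpq]
      simp [pvIc, hlt]
    · rename_i hlt
      simp only [pvIc, if_neg hlt]
      simp; omega

theorem pvOuter_eq_cm : ∀ (n : Nat) (s e p q : List Int), s.length ≤ n → s.length = e.length →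
    p.length = q.length →
    pvOuter (p ++ s) (q ++ e) p.length (p.length + s.length) =
      (p ++ (pvCm s e).1, q ++ (pvCm s e).2) := by
  intro n
  induction n with
  | zero =>
    intro s e p q hn hlen hpq
    obtain rfl : s = [] := List.length_eq_zero_iff.mp (by omega)
    obtain rfl : e = [] := List.length_eq_zero_iff.mp (by omega)
    rw [pvOuter]
    simp [pvCm]
  | succ n ihn =>
    intro s e p q hn hlen hpq
    match s, e, hlen with
    | [], e, hlen =>
      obtain rfl : e = [] := List.length_eq_zero_iff.mp (by simpa using hlen.symm)
      rw [pvOuter]; simp [pvCm]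
    | [a], e, hlen =>
      obtain ⟨b, rfl⟩ : ∃ b, e = [b] := by
        cases e with
        | nil => simp at hlen
        | cons b t =>
          cases t with
          | nil => exact ⟨b, rfl⟩
          | cons c u => simp at hlen
      rw [pvOuter, if_neg (by simp)]
      simp [pvCm]
    | s0 :: s1 :: ss, e, hlen =>
      obtain ⟨e0, e1, es, rfl⟩ : ∃ e0 e1 es, e = e0 :: e1 :: es := by
        cases e with
        | nil => simp at hlen
        | cons e0 t =>
          cases t with
          | nil => simp at hlen
          | cons e1 es => exact ⟨e0, e1, es, rfl⟩
      rw [pvOuter, if_pos (by simp only [List.length_cons]; omega)]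
      have harg : p.length + (s0 :: s1 :: ss).length = p.length + (2 + ss.length) := by
        simp only [List.length_cons]; omega
      rw [harg, pvInner_eq_ic ss es (by simpa using hlen) s0 s1 e0 e1 p q hpq]
      have hhead : (pvIc (s0 :: s1 :: ss) (e0 :: e1 :: es)).1.head? = some s0 := by
        rw [pvIc_head?]; rfl
      obtain ⟨S', hS⟩ : ∃ S', (pvIc (s0 :: s1 :: ss) (e0 :: e1 :: es)).1 = s0 :: S' := by
        cases hSc : (pvIc (s0 :: s1 :: ss) (e0 :: e1 :: es)).1 with
        | nil => rw [hSc] at hhead; simp at hhead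
        | cons c t =>
          rw [hSc] at hhead
          simp at hhead
          exact ⟨t, by rw [hhead]⟩
      have hSE : (pvIc (s0 :: s1 :: ss) (e0 :: e1 :: es)).1.length
          = (pvIc (s0 :: s1 :: ss) (e0 :: e1 :: es)).2.length := pvIc_len hlen
      obtain ⟨E0, E', hE⟩ : ∃ E0 E',
          (pvIc (s0 :: s1 :: ss) (e0 :: e1 :: es)).2 = E0 :: E' := by
        cases hEc : (pvIc (s0 :: s1 :: ss) (e0 :: e1 :: es)).2 with
        | nil => rw [hS, hEc] at hSE; simp at hSE
        | cons c t => exact ⟨c, t, rfl⟩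
      have hSE' : S'.length = E'.length := by
        rw [hS, hE] at hSE; simpa using hSE
      have hle : S'.length ≤ n := by
        have h1 := pvIc_len_le (s0 :: s1 :: ss) (e0 :: e1 :: es)
        rw [hS] at h1
        simp at h1 hn ⊢
        omega
      rw [hS, hE]
      have hstep : p ++ s0 :: S' = (p ++ [s0]) ++ S' := by simp
      have hstepq : q ++ E0 :: E' = (q ++ [E0]) ++ E' := by simp
      have hit : p.length + 1 = (p ++ [s0]).length := by simp
      have htl : p.length + (s0 :: S').length = (p ++ [s0]).length + S'.length := by
        simp only [List.length_cons, List.length_append, List.length_nil]; omega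
      rw [hstep, hstepq, hit, htl]
      rw [ihn S' E' (p ++ [s0]) (q ++ [E0]) hle hSE' (by simp only [List.length_append, List.length_cons, List.length_nil]; omega)]
      have hcm := pvCm_eq_ic (s0 :: s1 :: ss) (e0 :: e1 :: es) (by simp) hlen
      rw [hS, hE] at hcm
      simp only [hcm]
      simp

-- fold with a guarded body = fold of the filtered list
theorem pv_foldl_ite_filter {α β : Type} (c : α → Prop) [DecidablePred c] (g : β → α → β) :
    ∀ (l : List α) (init : β),
      l.foldl (fun acc x => if c x then g acc x else acc) init
        = (l.filter (fun x => decide (c x))).foldl g init := by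
  intro l
  induction l with
  | nil => intro init; rfl
  | cons x xs ih =>
    intro init
    by_cases hc : c x <;> simp [hc, ih]

theorem pv_foldl_append_id : ∀ (l acc : List Int), l.foldl (fun acc x => acc ++ [x]) acc = acc ++ l := by
  intro l
  induction l with
  | nil => intro acc; simp
  | cons x xs ih => intro acc; simp [ih]

-- B's accumulator fold computes the canonical pair merge
theorem pv_bfold_pm : ∀ (E : List Int) (acc : List (Int × Int)) (a b : Int),
    E.foldl pvStep (acc ++ [(a, b)]) = acc ++ pvPm ((a, b) :: E.map (fun i => (i, i + 1))) := by
  intro E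
  induction E with
  | nil => intro acc a b; simp [pvPm]
  | cons i r ih =>
    intro acc a b
    simp only [List.foldl_cons]
    have hstep : pvStep (acc ++ [(a, b)]) i =
        if i - b < 100 then acc ++ [(a, i + 1)] else (acc ++ [(a, b)]) ++ [(i, i + 1)] := by
      simp [pvStep]
    rw [hstep]
    by_cases hlt : i - b < 100
    · rw [if_pos hlt, ih]
      simp [pvPm, hlt]
    · rw [if_neg hlt, ih (acc ++ [(a, b)]) i (i + 1)]
      simp [pvPm, hlt]

theorem pv_bfold_total (E : List Int) :
    E.foldl pvStep [] = pvPm (E.map (fun i => (i, i + 1))) := by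
  cases E with
  | nil => simp [pvPm]
  | cons i r =>
    simp only [List.foldl_cons]
    have h0 : pvStep [] i = [] ++ [(i, i + 1)] := by simp [pvStep]
    rw [h0, pv_bfold_pm r [] i (i + 1)]
    simp

-- zipping the canonical merge of the index lists gives the canonical pair merge
theorem pv_zip_cm_pm : ∀ (s e : List Int), s.length = e.length →
    (pvCm s e).1.zip (pvCm s e).2 = pvPm (s.zip e) := by
  intro s e
  fun_induction pvCm s e with
  | case1 s0 s1 ss e0 e1 es hlt ih =>
    intro h
    rw [ih (by simp at h ⊢; omega)]
    simp [pvPm, hlt]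
  | case2 s0 s1 ss e0 e1 es hlt ih =>
    intro h
    simp only [List.zip_cons_cons]
    rw [ih (by simp at h ⊢; omega)]
    simp [pvPm, hlt]
  | case3 s e hs =>
    intro h
    rcases s with _ | ⟨sa, _ | ⟨sb, st⟩⟩
    · simp [pvPm]
    · rcases e with _ | ⟨ea, _ | ⟨eb, eu⟩⟩
      · simp at h
      · simp [pvPm]
      · simp at h
    · rcases e with _ | ⟨ea, _ | ⟨eb, eu⟩⟩
      · simp at h
      · simp at h
      · exact (hs sa sb st ea eb eu rfl rfl).elim

theorem pv_zip_pairify (E : List Int) :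
    E.zip (E.map (fun i => i + 1)) = E.map (fun i => (i, i + 1)) := by
  induction E with
  | nil => rfl
  | cons x xs ih => simp [ih]

theorem pv_map_range_zip : ∀ (s e : List Int), s.length = e.length →
    (List.range s.length).map (fun k => (s.getD k 0, e.getD k 0)) = s.zip e := by
  intro s
  induction s with
  | nil => intro e h; simp
  | cons x xs ih =>
    intro e h
    cases e with
    | nil => simp at h
    | cons y ys =>
      rw [List.length_cons, List.range_succ_eq_map]
      simp only [List.map_cons, List.map_map, Function.comp_def, Nat.succ_eq_add_one,
        List.getD_cons_zero, List.getD_cons_succ]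
      rw [ih ys (by simpa using h)]
      simp

-- the final zip loop of A
theorem pv_zipfold (s e : List Int) (h : s.length = e.length) :
    (PySem.List.pyRange 0 ((s.length : Int)) 1).foldl
      (fun acc i => acc ++ [(PySem.List.pyGetD s i 0, PySem.List.pyGetD e i 0)]) []
      = s.zip e := by
  rw [PySem.List.foldl_append_singleton_eq_map, PySem.List.pyRange_one]
  simp only [List.nil_append, List.map_map]
  have hn : (((s.length : Int)) - 0).toNat = s.length := by omega
  rw [hn]
  rw [List.map_congr_left (fun k _ => by
    show ((PySem.List.pyGetD s ((0 : Int) + (k : Int)) 0, PySem.List.pyGetD e ((0 : Int) + (k : Int)) 0)) = (s.getD k 0, e.getD k 0)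
    rw [zero_add, PySem.List.pyGetD_natCast, PySem.List.pyGetD_natCast])]
  exact pv_map_range_zip s e h

theorem pv_starts_eq (a : List Int) :
    (PySem.List.pyRange 0 ((a.length : Int) - 1) 1).foldl
      (fun acc i => if PySem.List.pyGetD a i 0 = 0 ∧ PySem.List.pyGetD a (i + 1) 0 ≠ 0
                    then acc ++ [i] else acc) [] = pvEdges a := by
  rw [pv_foldl_ite_filter
    (c := fun i => PySem.List.pyGetD a i 0 = 0 ∧ PySem.List.pyGetD a (i + 1) 0 ≠ 0)
    (g := fun acc i => acc ++ [i]), pv_foldl_append_id, List.nil_append]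
  rfl

theorem pv_ends_eq (a : List Int) :
    (PySem.List.pyRange 1 ((a.length : Int)) 1).foldl
      (fun acc i => if PySem.List.pyGetD a (i - 1) 0 = 0 ∧ PySem.List.pyGetD a i 0 ≠ 0
                    then acc ++ [i] else acc) [] = (pvEdges a).map (fun i => i + 1) := by
  rw [pv_foldl_ite_filter
    (c := fun i => PySem.List.pyGetD a (i - 1) 0 = 0 ∧ PySem.List.pyGetD a i 0 ≠ 0)
    (g := fun acc i => acc ++ [i]), pv_foldl_append_id, List.nil_append]
  unfold pvEdges
  rw [PySem.List.pyRange_one 1 ((a.length : Int)), PySem.List.pyRange_one 0 ((a.length : Int) - 1)]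
  have hm : ((a.length : Int) - 1 - 0).toNat = ((a.length : Int) - 1).toNat := by omega
  rw [hm]
  rw [List.filter_map, List.filter_map, List.map_map]
  have hfil : (List.range ((a.length : Int) - 1).toNat).filter
        ((fun i => decide (PySem.List.pyGetD a (i - 1) 0 = 0 ∧ PySem.List.pyGetD a i 0 ≠ 0)) ∘
          (fun k : Nat => (1 : Int) + k))
      = (List.range ((a.length : Int) - 1).toNat).filter
        ((fun i => decide (PySem.List.pyGetD a i 0 = 0 ∧ PySem.List.pyGetD a (i + 1) 0 ≠ 0)) ∘
          (fun k : Nat => (0 : Int) + k)) := by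
    apply List.filter_congr
    intro k _
    simp only [Function.comp]
    have e2 : (1 : Int) + k = (0 + k) + 1 := by ring
    have e3 : (0 : Int) + k + 1 - 1 = 0 + k := by ring
    simp only [e2, e3]
  rw [hfil]
  apply List.map_congr_left
  intro k _
  simp only [Function.comp]
  ring

-- ===== VERDICT (by name: the statement is the Claim_ definition above) =====
theorem make_rectangle_from_boolean_spec : Claim_equal_make_rectangle_from_boolean := by
  intro a _
  unfold Spec_make_rectangle_from_boolean make_rectangle_from_boolean make_rectangle_from_boolean_alt
  simp only [pv_starts_eq a, pv_ends_eq a]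
  have hlenE : (pvEdges a).length = ((pvEdges a).map (fun i => i + 1)).length := by simp
  have houter := pvOuter_eq_cm (pvEdges a).length (pvEdges a) ((pvEdges a).map (fun i => i + 1))
    [] [] (le_refl _) hlenE rfl
  simp only [List.nil_append, List.length_nil, Nat.zero_add] at houter
  rw [houter]
  dsimp only
  have hcl := pvCm_len (pvEdges a) ((pvEdges a).map (fun i => i + 1)) hlenE
  rw [pv_zipfold _ _ hcl]
  rw [pv_zip_cm_pm (pvEdges a) ((pvEdges a).map (fun i => i + 1)) hlenE, pv_zip_pairify]
  symm
  show (PySem.List.pyRange 0 ((a.length : Int) - 1) 1).foldl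
      (fun res i => if PySem.List.pyGetD a i 0 = 0 ∧ PySem.List.pyGetD a (i + 1) 0 ≠ 0
                    then pvStep res i else res) [] = _
  rw [pv_foldl_ite_filter
    (c := fun i => PySem.List.pyGetD a i 0 = 0 ∧ PySem.List.pyGetD a (i + 1) 0 ≠ 0)
    (g := pvStep)]
  exact pv_bfold_total (pvEdges a)
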